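-- pv_equiv track=rewrite | github.com/sungyujeon/problem-solving | others/kakao/kakao2021-fh/2.py | solution
-- ===== SOURCE A (Python) =====
-- def comb(s, n, resDict):
--
--     def dfs(s, i, depth, n, rs, resDict):
--         if depth == n:
--             if resDict[n].get(rs) == None:
--                 resDict[n][rs] = 1
--             else:
--                 resDict[n][rs] += 1
--             return
--
--         for k in range(i, len(s) - n + depth + 1):
--             dfs(s, k+1, depth+1, n, rs+s[k], resDict)
--
--     dfs(s, 0, 0, n, '', resDict)
--
-- def solution(orders, course):
--     resDict = {}
--     for num in course:
--         resDict[num] = {}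
--
--     for num in course:
--         for order in orders:
--             tmpOrder = sorted(list(order))
--             if len(order) >= num:
--                 comb(tmpOrder, num, resDict)
--
--     res = []
--     for num in course:
--         resDict[num] = sorted(resDict[num].items(), key=lambda x: (
--             x[1], x[0]), reverse=True)
--
--         tmpMax = 2
--         for item in resDict[num]:
--             if item[1] >= tmpMax:
--                 tmpMax = item[1]
--                 res.append(item[0])
--             else:
--                 break
--
--     res.sort()
--
--     return res
-- ===== SOURCE B (Python) =====
-- def _combos(chars, n):
--     # all length-n subsequences of chars (as strings), take-or-skip the head
--     if n == 0:
--         return ['']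
--     if n < 0 or len(chars) < n:
--         return []
--     rest = chars[1:]
--     return [chars[0] + t for t in _combos(rest, n - 1)] + _combos(rest, n)
--
--
-- def solution(orders, course):
--     res = []
--     for num in course:
--         counts = {}
--         for order in orders:
--             for key in _combos(''.join(sorted(order)), num):
--                 counts[key] = counts.get(key, 0) + 1
--         if counts:
--             m = max(counts.values())
--             if m >= 2:
--                 res.extend(k for k, c in counts.items() if c == m)
--     return sorted(res)
-- ===== Notes on version B (the rewrite author's own statement) =====
-- stated objective: simpler
-- what changed: Replaces A's mutating index-range DFS enumerator writing into a shared dict-of-dicts by a pure take-or-skip combination recursion feeding a per-course-length counter, and replaces A's sort-pairs-descending-then-walk-with-running-tmpMax-and-break selection by max(counts.values()) plus a filter of the keys at that count.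
import Mathlib
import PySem

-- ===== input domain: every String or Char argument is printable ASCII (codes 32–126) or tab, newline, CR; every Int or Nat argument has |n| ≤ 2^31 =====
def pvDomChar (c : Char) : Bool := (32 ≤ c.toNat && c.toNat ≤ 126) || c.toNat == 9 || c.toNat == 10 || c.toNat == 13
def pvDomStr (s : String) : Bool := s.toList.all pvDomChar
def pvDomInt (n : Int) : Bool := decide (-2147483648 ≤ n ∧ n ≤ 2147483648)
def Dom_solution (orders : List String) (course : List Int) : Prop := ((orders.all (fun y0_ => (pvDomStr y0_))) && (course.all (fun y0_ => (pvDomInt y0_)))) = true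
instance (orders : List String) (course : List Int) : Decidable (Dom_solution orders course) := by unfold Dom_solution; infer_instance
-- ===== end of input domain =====

-- B replaces A's mutating index-DFS enumerator and its "sort (count,key) pairs descending,
-- walk with a running tmpMax, break" selection by a pure take-or-skip combination recursion
-- and a per-course-length counter queried with max(); objective: simpler.
-- Both ports work on List Char internally (Python str ↔ List Char, same lexicographic order
-- per PYSEM.md) and convert to String only on the final returned list.

-- ===== PORT A =====
-- A's counter update: `resDict[n].get(rs) == None` test, then `= 1` / `+= 1`.
def incrA (d : PySem.Dict (List Char) Int) (rs : List Char) : PySem.Dict (List Char) Int :=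
  match d.get? rs with
  | none => d.insert rs 1
  | some v => d.insert rs (v + 1)

-- A's inner dfs.  `fuel` is only a structural-termination guard (the Python recursion depth
-- here is n - depth, and comb below supplies n.toNat + 1, enough whenever dfs terminates);
-- the `none => d` arm of pyGet? is Python's IndexError (reached only outside Pre_).
def dfsA (fuel : Nat) (s : List Char) (i depth n : Int) (rs : List Char)
    (d : PySem.Dict (List Char) Int) : PySem.Dict (List Char) Int :=
  if depth = n then incrA d rs
  else
    match fuel with
    | 0 => d
    | fuel' + 1 =>
      (PySem.List.pyRange i ((s.length : Int) - n + depth + 1) 1).foldl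
        (fun d k =>
          match PySem.List.pyGet? s k with
          | none => d
          | some c => dfsA fuel' s (k + 1) (depth + 1) n (rs ++ [c]) d) d

def combA (s : List Char) (n : Int) (d : PySem.Dict (List Char) Int) :
    PySem.Dict (List Char) Int :=
  dfsA (n.toNat + 1) s 0 0 n [] d

-- the `for item in resDict[num]: … break` loop, appending item[0] while item[1] >= tmpMax
def walkA : Int → List (List Char × Int) → List (List Char)
  | _, [] => []
  | tmpMax, item :: rest => if item.2 ≥ tmpMax then item.1 :: walkA item.2 rest else []

-- In the result loop A stores sorted(resDict[num].items(), …) back into resDict[num] and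
-- immediately iterates it; under Pre_ (no duplicate course entries) that slot is never read
-- again, so the sorted pair list is ported as the local `items`.
def solution (orders : List String) (course : List Int) : List String :=
  let resDict : PySem.Dict Int (PySem.Dict (List Char) Int) :=
    course.foldl (fun d num => d.insert num PySem.Dict.empty) PySem.Dict.empty
  let resDict := course.foldl (fun d num =>
      orders.foldl (fun d order =>
        let tmpOrder := PySem.List.sorted order.toList (fun c => c) false
        if ((PySem.Str.len order : Int)) ≥ num then
          d.modify num PySem.Dict.empty (combA tmpOrder num)
        else d) d) resDict
  let res : List (List Char) := course.foldl (fun res num =>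
      let items := PySem.List.sorted2 (resDict.getD num PySem.Dict.empty).items
          (fun x => x.2) (fun x => x.1) true
      res ++ walkA 2 items) []
  (PySem.List.sorted res (fun x => x) false).map String.ofList

-- ===== PORT B =====
-- Source B's _combos: take-or-skip the head character
def combosB : List Char → Int → List (List Char)
  | chars, n =>
    match chars with
    | [] => if n = 0 then [[]] else []
    | c :: rest =>
      if n = 0 then [[]]
      else if n < 0 ∨ ((c :: rest).length : Int) < n then []
      else (combosB rest (n - 1)).map (c :: ·) ++ combosB rest n

def solution_alt (orders : List String) (course : List Int) : List String :=
  let res : List (List Char) := course.foldl (fun res num =>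
      let counts : PySem.Dict (List Char) Int := orders.foldl (fun cnt order =>
          (combosB (PySem.List.sorted order.toList (fun c => c) false) num).foldl
            (fun cnt key => cnt.insert key (cnt.getD key 0 + 1)) cnt)
        PySem.Dict.empty
      match PySem.List.max? counts.values (fun v => v) with
      | none => res
      | some m =>
        if m ≥ 2 then
          res ++ (counts.items.filter (fun p => p.2 == m)).map (fun p => p.1)
        else res) []
  (PySem.List.sorted res (fun x => x) false).map String.ofList

-- ===== PRECONDITION & SPEC =====
-- Pre_ excludes exactly the inputs on which A raises: a duplicated course entry makes A's
-- result loop call .items() on the list it stored into resDict[num] (AttributeError), and a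
-- negative course entry with at least one order sends dfs past the end of s (IndexError).
def Pre_solution (orders : List String) (course : List Int) : Prop :=
  course.Nodup ∧ (orders = [] ∨ ∀ n ∈ course, 0 ≤ n)
instance (orders : List String) (course : List Int) : Decidable (Pre_solution orders course) := by
  unfold Pre_solution; infer_instance

def pvWitness_solution : List String × List Int := (["ab", "ba", "c"], [2])

def Spec_solution (orders : List String) (course : List Int) (out : List String) : Prop :=
  out = solution_alt orders course
instance (orders : List String) (course : List Int) (out : List String) :
    Decidable (Spec_solution orders course out) := by unfold Spec_solution; infer_instance

-- ===== CLAIM (what is proved, stated in full; the proofs are below) =====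
def Claim_equal_solution : Prop := ∀ (orders : List String) (course : List Int),
  Dom_solution orders course → Pre_solution orders course →
  Spec_solution orders course (solution orders course)

-- ===== LEMMAS AND PROOFS =====

-- A's counter update is exactly B's `counts[key] = counts.get(key, 0) + 1`
theorem incrA_eq : incrA = fun d rs => d.insert rs (d.getD rs 0 + 1) := by
  funext d rs
  unfold incrA PySem.Dict.getD
  cases d.get? rs <;> simp

-- structural facts about B's take-or-skip enumerator
theorem combosB_nil_of_length_lt (chars : List Char) (n : Int)
    (h : (chars.length : Int) < n) : combosB chars n = [] := by
  cases chars with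
  | nil => simp only [combosB]; rw [if_neg (by simp at h; omega)]
  | cons c rest => simp only [combosB]; rw [if_neg (by omega), if_pos (by omega)]

theorem combosB_zero (chars : List Char) : combosB chars 0 = [[]] := by
  cases chars <;> simp [combosB]

theorem combosB_cons (c : Char) (rest : List Char) (n : Int) (h0 : 0 < n)
    (hlen : n ≤ ((c :: rest).length : Int)) :
    combosB (c :: rest) n = (combosB rest (n - 1)).map (c :: ·) ++ combosB rest n := by
  simp only [combosB]
  rw [if_neg (by omega), if_neg (by omega)]

-- A's dfs loop over k ∈ range(i, len(s)-n+depth+1) counts rs+combo for every combo of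
-- size n-depth drawn (in the same order) from s[i:], i.e. B's enumerator applied to s[i:]
theorem dfs_loop (fuel' : Nat) (s : List Char) (n depth : Int) (rs : List Char)
    (hdn : depth < n)
    (hIH : ∀ (i' : Int) (rs' : List Char) (d : PySem.Dict (List Char) Int),
      0 ≤ i' →
      dfsA fuel' s i' (depth + 1) n rs' d
        = ((combosB (s.drop i'.toNat) (n - (depth + 1))).map (rs' ++ ·)).foldl incrA d) :
    ∀ (k : Nat) (i : Int) (d : PySem.Dict (List Char) Int), 0 ≤ i →
      (((s.length : Int) - n + depth + 1 - i).toNat ≤ k) →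
      ((PySem.List.pyRange i ((s.length : Int) - n + depth + 1) 1).foldl
        (fun d kk =>
          match PySem.List.pyGet? s kk with
          | none => d
          | some c => dfsA fuel' s (kk + 1) (depth + 1) n (rs ++ [c]) d) d)
        = ((combosB (s.drop i.toNat) (n - depth)).map (rs ++ ·)).foldl incrA d := by
  intro k
  induction k with
  | zero =>
    intro i d hi hk
    rw [PySem.List.pyRange_one_eq_nil (by omega)]
    rw [combosB_nil_of_length_lt _ _ (by simp; omega)]
    simp
  | succ k ih =>
    intro i d hi hk
    by_cases hend : (s.length : Int) - n + depth + 1 ≤ i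
    · rw [PySem.List.pyRange_one_eq_nil hend]
      rw [combosB_nil_of_length_lt _ _ (by simp; omega)]
      simp
    · push_neg at hend
      have hitn : i.toNat < s.length := by omega
      rw [PySem.List.pyRange_one_cons hend]
      simp only [List.foldl_cons]
      rw [PySem.List.pyGet?_of_nonneg_of_lt s hi (by omega)]
      simp only [List.getElem?_eq_getElem hitn]
      rw [hIH (i + 1) (rs ++ [s[i.toNat]]) d (by omega)]
      rw [ih (i + 1) _ (by omega) (by omega)]
      have hdrop : s.drop i.toNat = s[i.toNat] :: s.drop (i.toNat + 1) :=
        List.drop_eq_getElem_cons hitn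
      have hto : (i + 1).toNat = i.toNat + 1 := by omega
      rw [hdrop, combosB_cons _ _ _ (by omega) (by simp; omega), hto]
      have h2 : n - depth - 1 = n - (depth + 1) := by ring
      rw [List.map_append, List.foldl_append, List.map_map, h2]
      have hmc : List.map (fun x => rs ++ [s[i.toNat]] ++ x)
            (combosB (List.drop (i.toNat + 1) s) (n - (depth + 1)))
          = List.map ((fun x => rs ++ x) ∘ fun x => s[i.toNat] :: x)
            (combosB (List.drop (i.toNat + 1) s) (n - (depth + 1))) :=
        List.map_congr_left (fun t _ => by simp [Function.comp, List.append_assoc])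
      rw [hmc]

theorem dfs_eq (fuel : Nat) (s : List Char) (n depth i : Int) (rs : List Char)
    (d : PySem.Dict (List Char) Int) (hdn : depth ≤ n)
    (hfuel : (n - depth).toNat < fuel) (hi : 0 ≤ i) :
    dfsA fuel s i depth n rs d
      = ((combosB (s.drop i.toNat) (n - depth)).map (rs ++ ·)).foldl incrA d := by
  induction fuel generalizing depth i rs d with
  | zero => omega
  | succ fuel' ih =>
    by_cases h : depth = n
    · subst h
      rw [dfsA]
      rw [if_pos rfl]
      simp [combosB_zero]
    · have hdn' : depth < n := by omega
      rw [dfsA, if_neg h]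
      exact dfs_loop fuel' s n depth rs hdn'
        (fun i' rs' d' hi' => ih (depth + 1) i' rs' d' (by omega) (by omega) hi')
        (((s.length : Int) - n + depth + 1 - i).toNat) i d hi (le_refl _)

-- A's comb(s, n, ·) on the inner counter = one folded pass of B's enumerator
theorem combA_eq (s : List Char) (n : Int) (d : PySem.Dict (List Char) Int) (hn : 0 ≤ n) :
    combA s n d = (combosB s n).foldl incrA d := by
  unfold combA
  rw [dfs_eq (n.toNat + 1) s n 0 0 [] d hn (by omega) (by omega)]
  simp

-- ===== counting phase =====

theorem fold_insert_empty_get? (l : List Int) (num : Int)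
    (d : PySem.Dict Int (PySem.Dict (List Char) Int)) :
    (l.foldl (fun d k => d.insert k PySem.Dict.empty) d).get? num
      = if num ∈ l then some PySem.Dict.empty else d.get? num := by
  induction l generalizing d with
  | nil => simp
  | cons k ks ih =>
    simp only [List.foldl_cons, ih, List.mem_cons]
    by_cases hk : num ∈ ks
    · simp [hk]
    · by_cases he : num = k
      · subst he; simp [hk, PySem.Dict.get?_insert_self]
      · simp [hk, he, PySem.Dict.get?_insert_of_ne _ _ he]

theorem pass_get?_ne (orders : List String) (num j : Int)
    (f : String → PySem.Dict (List Char) Int → PySem.Dict (List Char) Int)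
    (cond : String → Prop) [DecidablePred cond]
    (hne : j ≠ num) (d : PySem.Dict Int (PySem.Dict (List Char) Int)) :
    (orders.foldl (fun d order =>
        if cond order then d.modify num PySem.Dict.empty (f order) else d) d).get? j
      = d.get? j := by
  induction orders generalizing d with
  | nil => rfl
  | cons o os ih =>
    simp only [List.foldl_cons]
    rw [ih]
    by_cases hc : cond o
    · rw [if_pos hc]
      exact PySem.Dict.get?_insert_of_ne _ _ hne
    · rw [if_neg hc]

theorem pass_get?_self (orders : List String) (num : Int)
    (f : String → PySem.Dict (List Char) Int → PySem.Dict (List Char) Int)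
    (cond : String → Prop) [DecidablePred cond]
    (d : PySem.Dict Int (PySem.Dict (List Char) Int)) (inn : PySem.Dict (List Char) Int)
    (h : d.get? num = some inn) :
    (orders.foldl (fun d order =>
        if cond order then d.modify num PySem.Dict.empty (f order) else d) d).get? num
      = some (orders.foldl (fun inn order =>
          if cond order then f order inn else inn) inn) := by
  induction orders generalizing d inn with
  | nil => simpa using h
  | cons o os ih =>
    simp only [List.foldl_cons]
    by_cases hc : cond o
    · rw [if_pos hc, if_pos hc]
      apply ih
      unfold PySem.Dict.modify PySem.Dict.getD
      rw [h]
      simp [PySem.Dict.get?_insert_self]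
    · rw [if_neg hc, if_neg hc]
      exact ih d inn h

theorem fold_pass_ne (l : List Int) (orders : List String) (j : Int)
    (f : String → Int → PySem.Dict (List Char) Int → PySem.Dict (List Char) Int)
    (cond : String → Int → Prop) [∀ o k, Decidable (cond o k)]
    (hj : j ∉ l) (d : PySem.Dict Int (PySem.Dict (List Char) Int)) :
    (l.foldl (fun d num' => orders.foldl (fun d order =>
        if cond order num' then d.modify num' PySem.Dict.empty (f order num') else d) d) d).get? j
      = d.get? j := by
  induction l generalizing d with
  | nil => rfl
  | cons k ks ih =>
    simp only [List.foldl_cons]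
    rw [ih (by simp at hj; exact hj.2)]
    exact pass_get?_ne orders k j (f · k) (cond · k) (by simp at hj; exact hj.1) d

-- the counter A has accumulated in resDict[num] at the end of the counting phase
theorem counting_phase (orders : List String) (course : List Int) (num : Int)
    (f : String → Int → PySem.Dict (List Char) Int → PySem.Dict (List Char) Int)
    (cond : String → Int → Prop) [∀ o k, Decidable (cond o k)]
    (hnd : course.Nodup) (hmem : num ∈ course) :
    ((course.foldl (fun d num' => orders.foldl (fun d order =>
        if cond order num' then d.modify num' PySem.Dict.empty (f order num') else d) d)
      (course.foldl (fun d k => d.insert k PySem.Dict.empty) PySem.Dict.empty)).getD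
        num PySem.Dict.empty)
      = orders.foldl (fun inn order =>
          if cond order num then f order num inn else inn) PySem.Dict.empty := by
  obtain ⟨l1, l2, rfl⟩ := List.append_of_mem hmem
  have h1 : num ∉ l1 := by
    intro hx
    exact (List.disjoint_of_nodup_append hnd) hx (by simp)
  have h2 : num ∉ l2 := by
    have := hnd.of_append_right
    simp at this
    exact this.1
  unfold PySem.Dict.getD
  rw [List.foldl_append, List.foldl_cons]
  rw [fold_pass_ne l2 orders num f cond h2]
  rw [pass_get?_self orders num (f · num) (cond · num) _ PySem.Dict.empty]
  · rfl
  · rw [fold_pass_ne l1 orders num f cond h1]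
    rw [fold_insert_empty_get?]
    simp

-- A's per-num counting pass = B's per-num counting pass
theorem counter_AB (orders : List String) (num : Int) (hn : orders = [] ∨ 0 ≤ num) :
    (orders.foldl (fun inn order =>
        if ((PySem.Str.len order : Int)) ≥ num then
          combA (PySem.List.sorted order.toList (fun c => c) false) num inn
        else inn) PySem.Dict.empty)
      = orders.foldl (fun cnt order =>
          (combosB (PySem.List.sorted order.toList (fun c => c) false) num).foldl
            (fun cnt key => cnt.insert key (cnt.getD key 0 + 1)) cnt) PySem.Dict.empty := by
  rcases hn with rfl | hn
  · rfl
  · refine PySem.List.foldl_congr_mem _ _ _ _ (fun inn order _ => ?_)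
    by_cases hc : ((PySem.Str.len order : Int)) ≥ num
    · rw [if_pos hc, combA_eq _ _ _ hn, incrA_eq]
    · rw [if_neg hc]
      rw [combosB_nil_of_length_lt _ _ (by
        rw [PySem.List.length_sorted]
        have : PySem.Str.len order = order.toList.length := by
          simp [PySem.Str.len_eq]
        omega)]
      rfl

-- ===== selection phase =====

theorem insertBy_pairwise {α : Type} (P : α → α → Prop) (before : α → α → Bool)
    (htrans : ∀ a b c, P a b → P b c → P a c)
    (hfalse : ∀ a b, before a b = false → P b a)
    (htrue : ∀ a b, before a b = true → P a b)
    (x : α) (l : List α) (h : l.Pairwise P) :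
    (PySem.List.insertBy before x l).Pairwise P := by
  induction l with
  | nil => simp [PySem.List.insertBy]
  | cons y ys ih =>
    rw [PySem.List.insertBy]
    by_cases hb : before x y = true
    · rw [if_pos hb]
      refine List.Pairwise.cons ?_ h
      intro w hw
      rcases List.mem_cons.mp hw with rfl | hw
      · exact htrue _ _ hb
      · exact htrans _ _ _ (htrue _ _ hb) ((List.pairwise_cons.mp h).1 w hw)
    · rw [if_neg hb]
      refine List.Pairwise.cons ?_ (ih (List.pairwise_cons.mp h).2)
      intro w hw
      rcases (PySem.List.mem_insertBy before x w ys).mp hw with rfl | hw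
      · exact hfalse _ _ (Bool.eq_false_iff.mpr hb)
      · exact (List.pairwise_cons.mp h).1 w hw

-- A sorts the (key, count) pairs by (count, key) descending: counts are non-increasing
theorem sorted2_rev_pairwise (xs : List (List Char × Int)) :
    (PySem.List.sorted2 xs (fun x => x.2) (fun x => x.1) true).Pairwise
      (fun a b => b.2 ≤ a.2) := by
  unfold PySem.List.sorted2
  suffices hgen : ∀ (l acc : List (List Char × Int)),
      acc.Pairwise (fun a b => b.2 ≤ a.2) →
      (l.foldl (fun acc x => PySem.List.insertBy
        (fun a b => decide (b.2 < a.2) || (!decide (a.2 < b.2) && decide (b.1 < a.1))) x acc)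
        acc).Pairwise (fun a b => b.2 ≤ a.2) by
    exact hgen xs [] (by simp)
  intro l
  induction l with
  | nil => intro acc h; exact h
  | cons x t ih =>
    intro acc h
    apply ih
    refine insertBy_pairwise (fun a b : List Char × Int => b.2 ≤ a.2) _
      (fun a b c hab hbc => le_trans hbc hab) ?_ ?_ x acc h
    · intro a b hb
      simp only [Bool.or_eq_false_iff, decide_eq_false_iff_not, Bool.and_eq_false_iff] at hb
      omega
    · intro a b hb
      simp only [Bool.or_eq_true, decide_eq_true_eq, Bool.and_eq_true,
        Bool.not_eq_true', decide_eq_false_iff_not] at hb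
      rcases hb with hb | ⟨hb, _⟩ <;> omega

-- A's tmpMax walk over a count-descending list whose counts are bounded by c picks
-- exactly the keys of count c
theorem walk_run (c : Int) (l : List (List Char × Int))
    (hp : l.Pairwise (fun a b => b.2 ≤ a.2)) (hle : ∀ p ∈ l, p.2 ≤ c) :
    walkA c l = (l.filter (fun p => p.2 == c)).map (fun p => p.1) := by
  induction l generalizing c with
  | nil => rfl
  | cons p t ih =>
    rw [walkA]
    by_cases hc : p.2 ≥ c
    · have hpc : p.2 = c := le_antisymm (hle p (by simp)) hc
      rw [if_pos hc]
      rw [List.filter_cons_of_pos (by simp [hpc])]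
      rw [List.map_cons]
      congr 1
      rw [hpc, ih c (List.pairwise_cons.mp hp).2
        (fun q hq => by have := (List.pairwise_cons.mp hp).1 q hq; omega)]
    · rw [if_neg hc]
      rw [List.filter_cons_of_neg (by simp; omega)]
      have : t.filter (fun p => p.2 == c) = [] := by
        rw [List.filter_eq_nil_iff]
        intro q hq
        have := (List.pairwise_cons.mp hp).1 q hq
        simp
        omega
      rw [this]
      rfl

-- A's selection (sort descending + tmpMax walk) is a permutation of B's (max + filter)
theorem selection_perm (cdict : PySem.Dict (List Char) Int) :
    (walkA 2 (PySem.List.sorted2 cdict.items (fun x => x.2) (fun x => x.1) true)).Perm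
      (match PySem.List.max? cdict.values (fun v => v) with
       | none => []
       | some m => if m ≥ 2 then
            (cdict.items.filter (fun p => p.2 == m)).map (fun p => p.1)
         else []) := by
  have hperm : (PySem.List.sorted2 cdict.items (fun x => x.2) (fun x => x.1) true).Perm
      cdict.items := PySem.List.sorted2_perm _ _ _ _
  have hpw := sorted2_rev_pairwise cdict.items
  cases hM : PySem.List.max? cdict.values (fun v => v) with
  | none =>
    have hv : cdict.values = [] := (PySem.List.max?_eq_none_iff _ _).mp hM
    have hitems : cdict.items = [] := by
      have : cdict.items.map (fun p => p.2) = [] := hv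
      simpa using this
    have : PySem.List.sorted2 cdict.items (fun x => x.2) (fun x => x.1) true = [] := by
      rw [← List.length_eq_zero_iff]
      rw [hperm.length_eq, hitems]
      rfl
    rw [this]
    exact List.Perm.refl _
  | some m =>
    have hmatch : (match some m with
        | none => ([] : List (List Char))
        | some m => if m ≥ 2 then
            (cdict.items.filter (fun p => p.2 == m)).map (fun p => p.1)
          else [])
        = if m ≥ 2 then (cdict.items.filter (fun p => p.2 == m)).map (fun p => p.1)
          else [] := rfl
    rw [hmatch]
    have hmmem : m ∈ cdict.values := PySem.List.max?_mem hM
    have hmax : ∀ v ∈ cdict.values, v ≤ m := fun v hv => PySem.List.max?_isMax hM v hv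
    have hle : ∀ p ∈ PySem.List.sorted2 cdict.items (fun x => x.2) (fun x => x.1) true,
        p.2 ≤ m := by
      intro p hp
      exact hmax p.2 (List.mem_map_of_mem (hperm.mem_iff.mp hp))
    cases hLnil : PySem.List.sorted2 cdict.items (fun x => x.2) (fun x => x.1) true with
    | nil =>
      exfalso
      have hitems : cdict.items = [] := by
        have := hperm.length_eq
        rw [hLnil] at this
        simpa [List.length_eq_zero_iff] using this.symm
      have : cdict.values = [] := by
        have : cdict.items.map (fun p => p.2) = [] := by rw [hitems]; rfl
        exact this
      rw [this] at hmmem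
      simp at hmmem
    | cons it t =>
      have hitmem : it ∈ cdict.items := by
        rw [← hperm.mem_iff, hLnil]
        simp
      have hit2 : it.2 = m := by
        have hub : it.2 ≤ m := hmax it.2 (List.mem_map_of_mem hitmem)
        obtain ⟨q, hqm, hq2⟩ := List.mem_map.mp hmmem
        have hqL : q ∈ it :: t := by rw [← hLnil, hperm.mem_iff]; exact hqm
        have hlb : m ≤ it.2 := by
          rcases List.mem_cons.mp hqL with rfl | hqt
          · omega
          · have := (List.pairwise_cons.mp (hLnil ▸ hpw)).1 q hqt
            omega
        omega
      by_cases h2 : m ≥ 2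
      · rw [if_pos h2]
        have hw2m : walkA 2 (it :: t) = walkA m (it :: t) := by
          rw [walkA, walkA, if_pos (by omega), if_pos (by omega)]
        rw [hLnil] at hpw hle
        rw [hw2m, walk_run m _ hpw hle]
        exact ((hLnil ▸ hperm).filter _).map _
      · rw [if_neg h2]
        rw [walkA, if_neg (by omega)]

-- ===== assembling =====

theorem flatMap_perm {α β : Type} (l : List α) (f g : α → List β)
    (h : ∀ x ∈ l, (f x).Perm (g x)) : (l.flatMap f).Perm (l.flatMap g) := by
  induction l with
  | nil => simp
  | cons x t ih =>
    simp only [List.flatMap_cons]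
    exact (h x (by simp)).append (ih (fun y hy => h y (List.mem_cons_of_mem _ hy)))

-- sorting with the identity key is permutation-invariant; this lemma only moves the ports'
-- List-Char LT instances to the LinearOrder ones of PySem.List.sorted_id_eq_sorted_id_iff_perm
theorem sorted_id_listChar_perm (xs ys : List (List Char)) (h : xs.Perm ys) :
    PySem.List.sorted xs (fun x => x) false = PySem.List.sorted ys (fun x => x) false := by
  have hb : (fun a b : List Char => decide (a < b))
      = (fun a b : List Char => @decide _ (LinearOrder.toDecidableLT a b)) :=
    funext fun a => funext fun b => decide_eq_decide.mpr Iff.rfl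
  have key : ∀ zs : List (List Char),
      PySem.List.sorted zs (fun x => x) false
        = @PySem.List.sorted (List Char) (List Char) _ LinearOrder.toDecidableLT zs
            (fun x => x) false := by
    intro zs
    show zs.foldl (fun acc x => PySem.List.insertBy (fun a b : List Char => decide (a < b)) x acc) []
      = zs.foldl (fun acc x => PySem.List.insertBy
          (fun a b : List Char => @decide _ (LinearOrder.toDecidableLT a b)) x acc) []
    rw [hb]
  rw [key xs, key ys]
  exact (PySem.List.sorted_id_eq_sorted_id_iff_perm xs ys).mpr h

-- ===== VERDICT (by name: the statement is the Claim_ definition above) =====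
theorem solution_spec : Claim_equal_solution := by
  intro orders course _ hpre
  obtain ⟨hnd, hcase⟩ := hpre
  unfold Spec_solution solution solution_alt
  apply congrArg (List.map String.ofList)
  apply sorted_id_listChar_perm
  show (course.foldl (fun res num => res ++ walkA 2 (PySem.List.sorted2
      (((course.foldl (fun d num => orders.foldl (fun d order =>
          if ((PySem.Str.len order : Int)) ≥ num then
            d.modify num PySem.Dict.empty
              (combA (PySem.List.sorted order.toList (fun c => c) false) num)
          else d) d)
        (course.foldl (fun d num => d.insert num PySem.Dict.empty)
          PySem.Dict.empty)).getD num PySem.Dict.empty).items)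
      (fun x => x.2) (fun x => x.1) true)) []).Perm
    (course.foldl (fun res num =>
      match PySem.List.max? ((orders.foldl (fun cnt order =>
          (combosB (PySem.List.sorted order.toList (fun c => c) false) num).foldl
            (fun cnt key => cnt.insert key (cnt.getD key 0 + 1)) cnt)
          PySem.Dict.empty : PySem.Dict (List Char) Int)).values (fun v => v) with
      | none => res
      | some m =>
        if m ≥ 2 then
          res ++ (((orders.foldl (fun cnt order =>
            (combosB (PySem.List.sorted order.toList (fun c => c) false) num).foldl
              (fun cnt key => cnt.insert key (cnt.getD key 0 + 1)) cnt)
            PySem.Dict.empty : PySem.Dict (List Char) Int)).items.filter (fun p => p.2 == m)).map (fun p => p.1)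
        else res) [])
  have hB : ∀ (res : List (List Char)) (cdict : PySem.Dict (List Char) Int),
      (match PySem.List.max? cdict.values (fun v => v) with
       | none => res
       | some m =>
         if m ≥ 2 then
           res ++ (cdict.items.filter (fun p => p.2 == m)).map (fun p => p.1)
         else res)
      = res ++ (match PySem.List.max? cdict.values (fun v => v) with
       | none => []
       | some m =>
         if m ≥ 2 then
           (cdict.items.filter (fun p => p.2 == m)).map (fun p => p.1)
         else []) := by
    intro res cdict
    cases PySem.List.max? cdict.values (fun v => v) with
    | none => simp
    | some m => by_cases h2 : m ≥ 2 <;> simp [h2]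
  rw [PySem.List.foldl_congr_mem course
    (fun res num =>
      match PySem.List.max? ((orders.foldl (fun cnt order =>
          (combosB (PySem.List.sorted order.toList (fun c => c) false) num).foldl
            (fun cnt key => cnt.insert key (cnt.getD key 0 + 1)) cnt)
          PySem.Dict.empty : PySem.Dict (List Char) Int)).values (fun v => v) with
      | none => res
      | some m =>
        if m ≥ 2 then
          res ++ (((orders.foldl (fun cnt order =>
            (combosB (PySem.List.sorted order.toList (fun c => c) false) num).foldl
              (fun cnt key => cnt.insert key (cnt.getD key 0 + 1)) cnt)
            PySem.Dict.empty : PySem.Dict (List Char) Int)).items.filter (fun p => p.2 == m)).map (fun p => p.1)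
        else res)
    (fun res num => res ++ (match PySem.List.max? ((orders.foldl (fun cnt order =>
          (combosB (PySem.List.sorted order.toList (fun c => c) false) num).foldl
            (fun cnt key => cnt.insert key (cnt.getD key 0 + 1)) cnt)
          PySem.Dict.empty : PySem.Dict (List Char) Int)).values (fun v => v) with
      | none => []
      | some m =>
        if m ≥ 2 then
          (((orders.foldl (fun cnt order =>
            (combosB (PySem.List.sorted order.toList (fun c => c) false) num).foldl
              (fun cnt key => cnt.insert key (cnt.getD key 0 + 1)) cnt)
            PySem.Dict.empty : PySem.Dict (List Char) Int)).items.filter (fun p => p.2 == m)).map (fun p => p.1)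
        else [])) []
    (fun res num _ => hB res _)]
  rw [PySem.List.foldl_append_eq_flatMap]
  rw [PySem.List.foldl_append_eq_flatMap]
  simp only [List.nil_append]
  apply flatMap_perm
  intro num hmem
  have hcnt : ((course.foldl (fun d num => orders.foldl (fun d order =>
          if ((PySem.Str.len order : Int)) ≥ num then
            d.modify num PySem.Dict.empty
              (combA (PySem.List.sorted order.toList (fun c => c) false) num)
          else d) d)
        (course.foldl (fun d num => d.insert num PySem.Dict.empty)
          PySem.Dict.empty)).getD num PySem.Dict.empty)
      = orders.foldl (fun inn order =>
          if ((PySem.Str.len order : Int)) ≥ num then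
            combA (PySem.List.sorted order.toList (fun c => c) false) num inn
          else inn) PySem.Dict.empty :=
    counting_phase orders course num
      (fun order num' => combA (PySem.List.sorted order.toList (fun c => c) false) num')
      (fun order num' => ((PySem.Str.len order : Int)) ≥ num') hnd hmem
  rw [hcnt]
  have hn : orders = [] ∨ 0 ≤ num := by
    rcases hcase with h | h
    · exact Or.inl h
    · exact Or.inr (h num hmem)
  rw [counter_AB orders num hn]
  exact selection_perm _
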